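-- pv_equiv track=rewrite | github.com/whyj107/CodeWar | 20220428_Find the total white and black areas in a strange chessboard.py | white_black_areas0
-- ===== SOURCE A (Python) =====
-- def white_black_areas0(cs, rs):
--     white, black = 0, 0
--     for idx, c in enumerate(cs):
--         w = (idx%2 == 0)
--         for r in rs:
--             if w:
--                 white += (c*r)
--             else:
--                 black += (c*r)
--             w = False if w else True
--     return (white, black)
-- ===== SOURCE B (Python) =====
-- def white_black_areas0(cs, rs):
--     # O(n+m): parity-split sums, combined by matching index parity.
--     ce, co = sum(cs[::2]), sum(cs[1::2])
--     re, ro = sum(rs[::2]), sum(rs[1::2])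
--     return (ce * re + co * ro, ce * ro + co * re)
-- ===== Notes on version B (the rewrite author's own statement) =====
-- stated objective: faster
-- what changed: Replaces the nested loop over all column/row pairs by four parity-split sums (even/odd index slices) combined with two multiplications per bucket.
import Mathlib
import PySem

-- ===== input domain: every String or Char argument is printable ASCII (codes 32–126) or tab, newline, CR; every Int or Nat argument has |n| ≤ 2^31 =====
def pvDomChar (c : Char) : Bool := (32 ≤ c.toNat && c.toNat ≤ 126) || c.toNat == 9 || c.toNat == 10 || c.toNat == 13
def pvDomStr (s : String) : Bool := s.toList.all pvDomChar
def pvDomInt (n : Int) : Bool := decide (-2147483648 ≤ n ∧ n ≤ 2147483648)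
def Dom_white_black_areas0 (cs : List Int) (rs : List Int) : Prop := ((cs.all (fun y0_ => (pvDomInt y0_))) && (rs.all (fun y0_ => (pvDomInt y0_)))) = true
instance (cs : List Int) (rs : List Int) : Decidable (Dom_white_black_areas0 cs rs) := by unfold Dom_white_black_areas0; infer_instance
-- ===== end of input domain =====

-- B replaces A's nested O(n*m) loop by four parity-split sums combined arithmetically (O(n+m)).
-- A returns a Python tuple (white, black); both ports render it as the two-element list [white, black].

-- ===== PORT A =====
def white_black_areas0 (cs : List Int) (rs : List Int) : List Int :=
  let res := (PySem.List.enumerate cs 0).foldl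
    (fun (wb : Int × Int) (p : Int × Int) =>
      let w0 := PySem.Int.mod p.1 2 == 0
      let s := rs.foldl
        (fun (st : Int × Int × Bool) (r : Int) =>
          let st' := if st.2.2 then (st.1 + p.2 * r, st.2.1, st.2.2)
                     else (st.1, st.2.1 + p.2 * r, st.2.2)
          (st'.1, st'.2.1, if st'.2.2 then false else true))
        (wb.1, wb.2, w0)
      (s.1, s.2.1))
    (0, 0)
  [res.1, res.2]

-- ===== PORT B =====
-- hand port of the step-2 slice xs[::2] (PySem.List.slice has no step): every second element
def pvEveryOther : List Int → List Int
  | [] => []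
  | [x] => [x]
  | x :: _ :: t => x :: pvEveryOther t

def white_black_areas0_alt (cs : List Int) (rs : List Int) : List Int :=
  let ce := (pvEveryOther cs).sum
  let co := (pvEveryOther cs.tail).sum
  let re := (pvEveryOther rs).sum
  let ro := (pvEveryOther rs.tail).sum
  [ce * re + co * ro, ce * ro + co * re]

-- ===== PRECONDITION & SPEC =====
def Spec_white_black_areas0 (cs : List Int) (rs : List Int) (out : List Int) : Prop := out = white_black_areas0_alt cs rs
instance (cs : List Int) (rs : List Int) (out : List Int) : Decidable (Spec_white_black_areas0 cs rs out) := by unfold Spec_white_black_areas0; infer_instance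

-- ===== CLAIM (what is proved, stated in full; the proofs are below) =====
def Claim_equal_white_black_areas0 : Prop := ∀ (cs : List Int) (rs : List Int), Dom_white_black_areas0 cs rs → Spec_white_black_areas0 cs rs (white_black_areas0 cs rs)

-- ===== LEMMAS AND PROOFS =====

-- parity sums: (sum at even positions, sum at odd positions)
def psum (xs : List Int) : Int × Int := ((pvEveryOther xs).sum, (pvEveryOther xs.tail).sum)

theorem psum_cons (x : Int) (t : List Int) : psum (x :: t) = (x + (psum t).2, (psum t).1) := by
  cases t with
  | nil => simp [psum, pvEveryOther]
  | cons y u => simp [psum, pvEveryOther]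

-- the inner loop over rs, from an arbitrary state
theorem inner_eq (c : Int) (rs : List Int) : ∀ (wh bl : Int) (w0 : Bool),
    rs.foldl
      (fun (st : Int × Int × Bool) (r : Int) =>
        let st' := if st.2.2 then (st.1 + c * r, st.2.1, st.2.2)
                   else (st.1, st.2.1 + c * r, st.2.2)
        (st'.1, st'.2.1, if st'.2.2 then false else true))
      (wh, bl, w0)
    = (wh + c * (if w0 then (psum rs).1 else (psum rs).2),
       bl + c * (if w0 then (psum rs).2 else (psum rs).1),
       if rs.length % 2 = 0 then w0 else !w0) := by
  induction rs with
  | nil => intro wh bl w0; simp [psum, pvEveryOther]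
  | cons r t ih =>
    intro wh bl w0
    cases w0 with
    | true =>
      simp only [List.foldl_cons, if_pos, psum_cons]
      rw [ih]
      have h : (r :: t).length % 2 = 0 ↔ ¬ (t.length % 2 = 0) := by
        simp [List.length_cons]; omega
      refine Prod.ext ?_ (Prod.ext ?_ ?_)
      · simp; ring
      · simp
      · simp only [List.length_cons]
        by_cases hp : t.length % 2 = 0
        · simp [hp, show ¬((t.length+1)%2=0) by omega]
        · simp [hp, show (t.length+1)%2=0 by omega]
    | false =>
      simp only [List.foldl_cons, psum_cons]
      rw [show (if (false : Bool) then (wh + c * r, bl, false) else (wh, bl + c * r, false)) = (wh, bl + c * r, false) from rfl]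
      rw [ih]
      refine Prod.ext ?_ (Prod.ext ?_ ?_)
      · simp
      · simp; ring
      · simp only [List.length_cons]
        by_cases hp : t.length % 2 = 0
        · simp [hp, show ¬((t.length+1)%2=0) by omega]
        · simp [hp, show (t.length+1)%2=0 by omega]

-- the outer loop over enumerate cs n, from an arbitrary accumulator
theorem outer_eq (rs : List Int) (cs : List Int) : ∀ (n wh bl : Int),
    ((PySem.List.enumerate cs n).foldl
      (fun (wb : Int × Int) (p : Int × Int) =>
        let w0 := PySem.Int.mod p.1 2 == 0
        let s := rs.foldl
          (fun (st : Int × Int × Bool) (r : Int) =>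
            let st' := if st.2.2 then (st.1 + p.2 * r, st.2.1, st.2.2)
                       else (st.1, st.2.1 + p.2 * r, st.2.2)
            (st'.1, st'.2.1, if st'.2.2 then false else true))
          (wb.1, wb.2, w0)
        (s.1, s.2.1))
      (wh, bl))
    = (if PySem.Int.mod n 2 = 0
       then (wh + (psum cs).1 * (psum rs).1 + (psum cs).2 * (psum rs).2,
             bl + (psum cs).1 * (psum rs).2 + (psum cs).2 * (psum rs).1)
       else (wh + (psum cs).2 * (psum rs).1 + (psum cs).1 * (psum rs).2,
             bl + (psum cs).2 * (psum rs).2 + (psum cs).1 * (psum rs).1)) := by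
  induction cs with
  | nil =>
    intro n wh bl
    by_cases h : PySem.Int.mod n 2 = 0 <;>
      simp [PySem.List.enumerate, psum, pvEveryOther]
  | cons c t ih =>
    intro n wh bl
    rw [PySem.List.enumerate_cons, List.foldl_cons]
    simp only []
    rw [inner_eq c rs wh bl (PySem.Int.mod n 2 == 0), ih (n + 1)]
    have hm : PySem.Int.mod n 2 = n % 2 := PySem.Int.mod_eq_emod_of_pos (by omega)
    have hm1 : PySem.Int.mod (n + 1) 2 = (n + 1) % 2 := PySem.Int.mod_eq_emod_of_pos (by omega)
    have h2 : n % 2 = 0 ∨ n % 2 = 1 := Int.emod_two_eq_zero_or_one n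
    rcases h2 with h | h
    · have hn1 : ¬ ((n + 1) % 2 = 0) := by omega
      simp [h, hn1, psum_cons]
      constructor <;> ring
    · have hn1 : (n + 1) % 2 = 0 := by omega
      simp [h, hn1, psum_cons]
      constructor <;> ring

-- ===== VERDICT (by name: the statement is the Claim_ definition above) =====
theorem white_black_areas0_spec : Claim_equal_white_black_areas0 := by
  intro cs rs _
  show white_black_areas0 cs rs = white_black_areas0_alt cs rs
  unfold white_black_areas0 white_black_areas0_alt
  simp only []
  rw [outer_eq rs cs 0 0 0]
  simp [psum]
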